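-- pv_equiv track=rewrite | github.com/pavelhym/Algorithms_2021 | Lab8/Lab8.py | convert_to_edges
-- ===== SOURCE A (Python) =====
-- def convert_to_edges(adj_matrix):
--     edgelist = []
--     for i, v in enumerate(adj_matrix, 0):
--         for j, u in enumerate(v, 0):
--             if u != 0 :
--                 if [j,i,u] not in edgelist:
--                     edgelist.append([i,j,u])
--
--     return edgelist
-- ===== SOURCE B (Python) =====
-- def convert_to_edges(adj_matrix):
--     def keep(i, j, u):
--         # emit [i,j,u] unless the mirror cell (j,i) in an EARLIER row holds the same weight
--         return u != 0 and (j >= i or i >= len(adj_matrix[j]) or adj_matrix[j][i] != u)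
--     return [[i, j, u]
--             for i, row in enumerate(adj_matrix)
--             for j, u in enumerate(row)
--             if keep(i, j, u)]
-- ===== Notes on version B (the rewrite author's own statement) =====
-- stated objective: faster
-- what changed: A deduplicates by scanning the growing edgelist for the mirror triple [j,i,u] inside an accumulator loop; B has no accumulator at all: it is a single flat comprehension whose per-cell predicate is a closed-form mirror test against the matrix itself (keep [i,j,u] iff u!=0 and (j>=i or the mirror cell adj_matrix[j][i] is absent or differs)), with a bounds check for ragged matrices.
import Mathlib
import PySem

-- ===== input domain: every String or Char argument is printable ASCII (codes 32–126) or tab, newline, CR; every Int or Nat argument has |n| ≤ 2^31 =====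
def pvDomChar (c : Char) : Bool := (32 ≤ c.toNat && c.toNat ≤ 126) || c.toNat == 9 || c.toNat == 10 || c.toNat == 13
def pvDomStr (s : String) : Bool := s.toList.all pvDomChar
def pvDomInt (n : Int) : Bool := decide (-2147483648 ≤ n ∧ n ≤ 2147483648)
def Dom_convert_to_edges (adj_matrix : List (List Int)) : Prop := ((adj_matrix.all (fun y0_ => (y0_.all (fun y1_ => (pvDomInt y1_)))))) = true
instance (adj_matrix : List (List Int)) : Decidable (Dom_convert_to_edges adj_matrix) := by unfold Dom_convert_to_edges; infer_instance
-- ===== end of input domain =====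

-- B replaces A's accumulator loop with its O(E) membership scan of the growing edge list
-- by a flat comprehension whose per-cell predicate is a closed-form mirror-cell test
-- against the matrix itself (constant work per cell instead of a scan of the output).

-- ===== PORT A =====
def convert_to_edges (adj_matrix : List (List Int)) : List (List Int) :=
  (PySem.List.enumerate adj_matrix 0).foldl
    (fun edgelist iv =>
      (PySem.List.enumerate iv.2 0).foldl
        (fun el ju =>
          if ju.2 ≠ 0 then
            (if [ju.1, iv.1, ju.2] ∈ el then el else el ++ [[iv.1, ju.1, ju.2]])
          else el)
        edgelist)
    []

-- ===== PORT B =====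
-- helper 'keep' of Source B: emit [i,j,u] unless the mirror cell (j,i) in an earlier row holds u.
-- adj_matrix[j] is only reached when j < i ≤ len(adj_matrix), so the pyGetD default [] is never used.
def keepB (adj_matrix : List (List Int)) (i j u : Int) : Bool :=
  u != 0 && (decide (j ≥ i) ||
    decide (i ≥ PySem.List.len (PySem.List.pyGetD adj_matrix j [])) ||
    PySem.List.pyGetD (PySem.List.pyGetD adj_matrix j []) i 0 != u)

-- Source B's nested comprehension: flatMap over rows, filterMap over cells, no accumulator.
def convert_to_edges_alt (adj_matrix : List (List Int)) : List (List Int) :=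
  (PySem.List.enumerate adj_matrix 0).flatMap (fun iv =>
    (PySem.List.enumerate iv.2 0).filterMap (fun ju =>
      if keepB adj_matrix iv.1 ju.1 ju.2 then some [iv.1, ju.1, ju.2] else none))

-- ===== PRECONDITION & SPEC =====
def Spec_convert_to_edges (adj_matrix : List (List Int)) (out : List (List Int)) : Prop := out = convert_to_edges_alt adj_matrix
instance (adj_matrix : List (List Int)) (out : List (List Int)) : Decidable (Spec_convert_to_edges adj_matrix out) := by unfold Spec_convert_to_edges; infer_instance

-- ===== CLAIM (what is proved, stated in full; the proofs are below) =====
def Claim_equal_convert_to_edges : Prop := ∀ (adj_matrix : List (List Int)), Dom_convert_to_edges adj_matrix → Spec_convert_to_edges adj_matrix (convert_to_edges adj_matrix)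

-- ===== LEMMAS AND PROOFS =====

-- row a of the matrix (default [] out of range)
def rowOf (m : List (List Int)) (a : Nat) : List Int := m.getD a []

-- "cell (a,b) holding w is emitted": w ≠ 0 and the mirror cell (b,a) does not hold w in an earlier row
def emitb (m : List (List Int)) (a b : Nat) (w : Int) : Bool :=
  w != 0 && !(decide (b < a) && decide (a < (rowOf m b).length) && ((rowOf m b).getD a 0 == w))

-- the cells emitted from row i, columns j.. (tail = that suffix of the row)
def cellsFrom (m : List (List Int)) (i : Nat) : Nat → List Int → List (List Int)
  | _, [] => []
  | j, u :: t => (if emitb m i j u then [[(i : Int), (j : Int), u]] else []) ++ cellsFrom m i (j + 1) t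

-- the cells emitted from rows n.. (rows = that suffix of the matrix)
def srest (m : List (List Int)) : Nat → List (List Int) → List (List Int)
  | _, [] => []
  | n, r :: t => cellsFrom m n 0 r ++ srest m (n + 1) t

-- invariant: acc holds exactly the emitted triples of cells before position (i,j) in row-major order
def InvP (m : List (List Int)) (i j : Nat) (acc : List (List Int)) : Prop :=
  ∀ (a b : Nat) (w : Int), ([(a : Int), (b : Int), w] ∈ acc ↔
    ((a < i ∨ (a = i ∧ b < j)) ∧ b < (rowOf m a).length ∧ (rowOf m a).getD b 0 = w ∧ emitb m a b w = true))

lemma drop_facts {α : Type} (d : α) {l : List α} {j : Nat} {u : α} {t : List α}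
    (h : l.drop j = u :: t) : j < l.length ∧ l.getD j d = u ∧ l.drop (j + 1) = t := by
  have h0 : l[j]? = some u := by
    have : (l.drop j)[0]? = l[j + 0]? := List.getElem?_drop
    simpa [h] using this.symm
  refine ⟨?_, ?_, ?_⟩
  · exact (List.getElem?_eq_some_iff.mp h0).1
  · simp [List.getD, h0]
  · have : l.drop (j + 1) = (l.drop j).drop 1 := by
      rw [List.drop_drop]
    simp [this, h]

lemma inv_step_skip (m : List (List Int)) (i j : Nat) (u : Int) (acc : List (List Int))
    (hinv : InvP m i j acc) (hval : (rowOf m i).getD j 0 = u) (hc : emitb m i j u = false) :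
    InvP m i (j + 1) acc := by
  intro a b w
  rw [hinv a b w]
  constructor
  · rintro ⟨h1, h2, h3, h4⟩
    refine ⟨?_, h2, h3, h4⟩
    rcases h1 with h | ⟨he, hb⟩
    · exact Or.inl h
    · exact Or.inr ⟨he, by omega⟩
  · rintro ⟨h1, h2, h3, h4⟩
    refine ⟨?_, h2, h3, h4⟩
    rcases h1 with h | ⟨he, hb⟩
    · exact Or.inl h
    · by_cases hbj : b < j
      · exact Or.inr ⟨he, hbj⟩
      · exfalso
        have hb' : b = j := by omega
        subst he; subst hb'
        rw [hval] at h3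
        subst h3
        rw [h4] at hc
        simp at hc

lemma inv_step_add (m : List (List Int)) (i j : Nat) (u : Int) (acc : List (List Int))
    (hinv : InvP m i j acc) (hj : j < (rowOf m i).length)
    (hval : (rowOf m i).getD j 0 = u) (hc : emitb m i j u = true) :
    InvP m i (j + 1) (acc ++ [[(i : Int), (j : Int), u]]) := by
  intro a b w
  have heq : ([(a : Int), (b : Int), w] = [(i : Int), (j : Int), u]) ↔ (a = i ∧ b = j ∧ w = u) := by
    simp
  rw [List.mem_append, List.mem_singleton, hinv a b w, heq]
  constructor
  · rintro (⟨h1, h2, h3, h4⟩ | ⟨ha, hb, hw⟩)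
    · refine ⟨?_, h2, h3, h4⟩
      rcases h1 with h | ⟨he, hb⟩
      · exact Or.inl h
      · exact Or.inr ⟨he, by omega⟩
    · subst ha; subst hb; subst hw
      exact ⟨Or.inr ⟨rfl, by omega⟩, hj, hval, hc⟩
  · rintro ⟨h1, h2, h3, h4⟩
    rcases h1 with h | ⟨he, hb⟩
    · exact Or.inl ⟨Or.inl h, h2, h3, h4⟩
    · by_cases hbj : b < j
      · exact Or.inl ⟨Or.inr ⟨he, hbj⟩, h2, h3, h4⟩
      · right
        have hb' : b = j := by omega
        subst he; subst hb'
        refine ⟨rfl, rfl, ?_⟩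
        rw [hval] at h3
        exact h3.symm

lemma innerA (m : List (List Int)) (i : Nat) :
    ∀ (tail : List Int) (j : Nat) (acc : List (List Int)),
      (rowOf m i).drop j = tail → InvP m i j acc →
      ((PySem.List.enumerate tail (j : Int)).foldl
          (fun el ju =>
            if ju.2 ≠ 0 then
              (if [ju.1, (i : Int), ju.2] ∈ el then el else el ++ [[(i : Int), ju.1, ju.2]])
            else el) acc
        = acc ++ cellsFrom m i j tail)
      ∧ InvP m i (j + tail.length) (acc ++ cellsFrom m i j tail) := by
  intro tail
  induction tail with
  | nil =>
    intro j acc _ hinv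
    refine ⟨by simp [PySem.List.enumerate_nil, cellsFrom], ?_⟩
    simpa [cellsFrom] using hinv
  | cons u t ih =>
    intro j acc h hinv
    obtain ⟨hj, hval, hdrop⟩ := drop_facts 0 h
    rw [PySem.List.enumerate_cons, List.foldl_cons]
    have hcast : (j : Int) + 1 = ((j + 1 : Nat) : Int) := by push_cast; ring
    have hmem : ([(j : Int), (i : Int), u] ∈ acc) ↔
        (j < i ∧ i < (rowOf m j).length ∧ (rowOf m j).getD i 0 = u ∧ u ≠ 0) := by
      rw [hinv j i u]
      constructor
      · rintro ⟨h1, h2, h3, h4⟩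
        have hji : j < i := by
          rcases h1 with h | ⟨he, hb⟩
          · exact h
          · omega
        have hu : u ≠ 0 := by
          simp [emitb] at h4; exact h4.1
        exact ⟨hji, h2, h3, hu⟩
      · rintro ⟨hji, h2, h3, h4⟩
        refine ⟨Or.inl hji, h2, h3, ?_⟩
        simp [emitb, h4]
        left; left; omega
    by_cases h0 : u = 0
    · rw [if_neg (by simp [h0])]
      have hcf : emitb m i j u = false := by simp [emitb, h0]
      have hinv' := inv_step_skip m i j u acc hinv hval hcf
      obtain ⟨hres, hinv2⟩ := ih (j + 1) acc hdrop hinv'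
      have hcells : cellsFrom m i j (u :: t) = cellsFrom m i (j + 1) t := by
        simp [cellsFrom, hcf]
      have hlen : j + (u :: t).length = (j + 1) + t.length := by simp; omega
      rw [hcast, hcells, hlen]
      exact ⟨hres, hinv2⟩
    · by_cases hm : [(j : Int), (i : Int), u] ∈ acc
      · rw [if_pos h0, if_pos hm]
        obtain ⟨hji, hlen2, hgd, _⟩ := hmem.mp hm
        have hcf : emitb m i j u = false := by
          have hgd' : (rowOf m j)[i]'hlen2 = u := by
            rw [← List.getD_eq_getElem (rowOf m j) 0 hlen2]; exact hgd
          simp [emitb, hji, hlen2, hgd']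
        have hinv' := inv_step_skip m i j u acc hinv hval hcf
        obtain ⟨hres, hinv2⟩ := ih (j + 1) acc hdrop hinv'
        have hcells : cellsFrom m i j (u :: t) = cellsFrom m i (j + 1) t := by
          simp [cellsFrom, hcf]
        have hlen : j + (u :: t).length = (j + 1) + t.length := by simp; omega
        rw [hcast, hcells, hlen]
        exact ⟨hres, hinv2⟩
      · rw [if_pos h0, if_neg hm]
        have hct : emitb m i j u = true := by
          simp [emitb, h0]
          by_cases hji : j < i
          · by_cases hlen2 : i < (rowOf m j).length
            · right
              intro hgd
              exact hm (hmem.mpr ⟨hji, hlen2, hgd, h0⟩)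
            · left; right; omega
          · left; left; omega
        have hinv' := inv_step_add m i j u acc hinv hj hval hct
        obtain ⟨hres, hinv2⟩ := ih (j + 1) (acc ++ [[(i : Int), (j : Int), u]]) hdrop hinv'
        have hcells : cellsFrom m i j (u :: t) = [[(i : Int), (j : Int), u]] ++ cellsFrom m i (j + 1) t := by
          simp [cellsFrom, hct]
        have hlen : j + (u :: t).length = (j + 1) + t.length := by simp; omega
        rw [hcast, hcells, hlen, ← List.append_assoc]
        exact ⟨hres, hinv2⟩

lemma inv_shift (m : List (List Int)) (n : Nat) (acc : List (List Int))
    (h : InvP m n (rowOf m n).length acc) : InvP m (n + 1) 0 acc := by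
  intro a b w
  have := h a b w
  constructor
  · intro hm
    obtain ⟨h1, h2, h3, h4⟩ := this.mp hm
    refine ⟨?_, h2, h3, h4⟩
    left; omega
  · rintro ⟨h1, h2, h3, h4⟩
    apply this.mpr
    refine ⟨?_, h2, h3, h4⟩
    by_cases ha : a < n
    · left; exact ha
    · right; constructor
      · omega
      · have : a = n := by omega
        subst this; exact h2

lemma outerA (m : List (List Int)) :
    ∀ (rows : List (List Int)) (n : Nat) (acc : List (List Int)),
      m.drop n = rows → InvP m n 0 acc →
      (PySem.List.enumerate rows (n : Int)).foldl
          (fun edgelist iv =>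
            (PySem.List.enumerate iv.2 0).foldl
              (fun el ju =>
                if ju.2 ≠ 0 then
                  (if [ju.1, iv.1, ju.2] ∈ el then el else el ++ [[iv.1, ju.1, ju.2]])
                else el) edgelist) acc
        = acc ++ srest m n rows := by
  intro rows
  induction rows with
  | nil => intro n acc _ _; simp [PySem.List.enumerate_nil, srest]
  | cons r t ih =>
    intro n acc h hinv
    obtain ⟨hn, hrow, hdrop⟩ := drop_facts ([] : List Int) h
    have hrowOf : rowOf m n = r := hrow
    rw [PySem.List.enumerate_cons, List.foldl_cons]
    have hcast : (n : Int) + 1 = ((n + 1 : Nat) : Int) := by push_cast; ring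
    have hres : List.foldl
        (fun el ju => if ju.2 ≠ 0 then if [ju.1, (n : Int), ju.2] ∈ el then el else el ++ [[(n : Int), ju.1, ju.2]] else el)
        acc (PySem.List.enumerate r 0) = acc ++ cellsFrom m n 0 r := by
      simpa using (innerA m n r 0 acc (by rw [hrowOf]; simp) hinv).1
    have hinv2 := (innerA m n r 0 acc (by rw [hrowOf]; simp) hinv).2
    rw [hres, hcast]
    have hinv3 : InvP m (n + 1) 0 (acc ++ cellsFrom m n 0 r) := by
      apply inv_shift
      rw [hrowOf]
      simpa using hinv2
    rw [ih (n + 1) (acc ++ cellsFrom m n 0 r) hdrop hinv3]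
    simp [srest, List.append_assoc]

-- B's per-cell predicate is exactly 'emitb' on Nat indices
lemma keepB_eq_emitb (m : List (List Int)) (i j : Nat) (u : Int) :
    keepB m (i : Int) (j : Int) u = emitb m i j u := by
  rw [Bool.eq_iff_iff]
  simp [keepB, emitb, rowOf]

-- B's row comprehension computes the emitted cells of the row suffix
lemma innerB (m : List (List Int)) (i : Nat) :
    ∀ (tail : List Int) (j : Nat),
      (PySem.List.enumerate tail (j : Int)).filterMap
          (fun ju => if keepB m (i : Int) ju.1 ju.2 then some [(i : Int), ju.1, ju.2] else none)
        = cellsFrom m i j tail := by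
  intro tail
  induction tail with
  | nil => intro j; simp [PySem.List.enumerate_nil, cellsFrom]
  | cons u t ih =>
    intro j
    rw [PySem.List.enumerate_cons, List.filterMap_cons]
    have hcast : (j : Int) + 1 = ((j + 1 : Nat) : Int) := by push_cast; ring
    by_cases hc : emitb m i j u = true
    · rw [if_pos (by rw [keepB_eq_emitb]; exact hc), hcast, ih (j + 1)]
      simp [cellsFrom, hc]
    · rw [if_neg (by rw [keepB_eq_emitb]; exact hc), hcast, ih (j + 1)]
      simp [cellsFrom, hc]

-- B's outer comprehension computes the emitted cells of the matrix suffix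
lemma outerB (m : List (List Int)) :
    ∀ (rows : List (List Int)) (n : Nat),
      (PySem.List.enumerate rows (n : Int)).flatMap
          (fun iv => (PySem.List.enumerate iv.2 0).filterMap
            (fun ju => if keepB m iv.1 ju.1 ju.2 then some [iv.1, ju.1, ju.2] else none))
        = srest m n rows := by
  intro rows
  induction rows with
  | nil => intro n; simp [PySem.List.enumerate_nil, srest]
  | cons r t ih =>
    intro n
    rw [PySem.List.enumerate_cons, List.flatMap_cons]
    have hcast : (n : Int) + 1 = ((n + 1 : Nat) : Int) := by push_cast; ring
    rw [hcast, ih (n + 1)]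
    have h := innerB m n r 0
    simp only [Nat.cast_zero] at h
    rw [srest, h]

-- ===== VERDICT (by name: the statement is the Claim_ definition above) =====
theorem convert_to_edges_spec : Claim_equal_convert_to_edges := by
  intro m _
  unfold Spec_convert_to_edges convert_to_edges convert_to_edges_alt
  have hA := outerA m m 0 [] (by simp) (by intro a b w; simp)
  have hB := outerB m m 0
  simpa using hA.trans hB.symm
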